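-- pv_equiv track=rewrite | github.com/stevefai/bandmate | bassdataset.py | delete_extra_spaces
-- ===== SOURCE A (Python) =====
-- def delete_extra_spaces(seq):
--     tokens = seq
--     i = 0
--     while i < len(seq):
--         if seq[i] == 200:
--             j = i + 1
--             while j < len(seq) and seq[j] == 200:
--                 j += 1
--             j -= 1
--             # if we have spaces spanning more than a measure and a half
--             if j - i + 1 >= 24:
--                 limit = i - i % 16 + 16 + j % 16
--                 seq = seq[:limit] + seq[j + 1:]
--                 i = limit + 1
--             else:
--                 i = j + 1
--         else:
--             i += 1
--     return seq
-- ===== SOURCE B (Python) =====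
-- def delete_extra_spaces(seq):
--     # One pass: emit tokens into a fresh output list; for each maximal run of
--     # 200s of length >= 24 the kept length is computed directly from the
--     # current output length, with no re-slicing of the sequence.
--     out = []
--     i = 0
--     n = len(seq)
--     while i < n:
--         x = seq[i]
--         if x != 200:
--             out.append(x)
--             i += 1
--         else:
--             j = i
--             while j < n and seq[j] == 200:
--                 j += 1
--             run = j - i
--             if run >= 24:
--                 p = len(out)
--                 run = 16 - p % 16 + (p + run - 1) % 16
--             out.extend([200] * run)
--             i = j
--     return out
-- ===== Notes on version B (the rewrite author's own statement) =====
-- stated objective: alternative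
-- what changed: B makes a single pass appending tokens to a fresh output list and computes each collapsed run length arithmetically from the running output length, instead of A's rebuilding of the whole remaining sequence by slicing after every long run.
import Mathlib
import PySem

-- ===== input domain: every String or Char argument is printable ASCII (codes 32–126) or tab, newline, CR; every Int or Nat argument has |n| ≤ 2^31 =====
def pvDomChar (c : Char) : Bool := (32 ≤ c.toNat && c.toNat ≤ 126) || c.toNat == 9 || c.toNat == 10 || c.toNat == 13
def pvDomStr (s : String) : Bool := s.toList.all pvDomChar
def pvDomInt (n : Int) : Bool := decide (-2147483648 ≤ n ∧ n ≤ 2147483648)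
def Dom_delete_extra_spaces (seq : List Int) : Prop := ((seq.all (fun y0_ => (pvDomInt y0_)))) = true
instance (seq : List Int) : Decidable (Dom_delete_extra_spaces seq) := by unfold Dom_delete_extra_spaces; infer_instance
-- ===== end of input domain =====

-- B replaces A's repeated re-slicing of the sequence by a single pass that builds a
-- fresh output list, computing each collapsed run length from the running output
-- length (objective: alternative — a different traversal, no slice rebuilding).
-- The fuel parameters below only make the loops total; they are proved ample.

-- ===== PORT A =====
-- inner 'while j < len(seq) and seq[j] == 200: j += 1' of A
def innerA (seq : List Int) : Nat → Nat → Nat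
  | 0, j => j
  | fuel + 1, j =>
    if h : j < seq.length then
      if seq[j] = 200 then innerA seq fuel (j + 1) else j
    else j

-- main 'while i < len(seq)' of A; seq[:limit] / seq[j+1:] are List.take / List.drop
-- (exact here: limit and j+1 are nonnegative); each iteration shrinks
-- seq.length - i, so fuel seq.length + 1 never runs out
def loopA : Nat → List Int → Nat → List Int
  | 0, seq, _ => seq
  | fuel + 1, seq, i =>
    if h : i < seq.length then
      if seq[i] = 200 then
        let j := innerA seq seq.length (i + 1) - 1
        if j - i + 1 ≥ 24 then
          let limit := i - i % 16 + 16 + j % 16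
          loopA fuel (seq.take limit ++ seq.drop (j + 1)) (limit + 1)
        else loopA fuel seq (j + 1)
      else loopA fuel seq (i + 1)
    else seq

def delete_extra_spaces (seq : List Int) : List Int := loopA (seq.length + 1) seq 0

-- ===== PORT B =====
-- the single pass of B: 'rest' is the unprocessed suffix (cursor i), 'out' the
-- output built so far; every step consumes at least one token, so fuel
-- seq.length never runs out
def loopB : Nat → List Int → List Int → List Int
  | 0, _, out => out
  | fuel + 1, rest, out =>
    match rest with
    | [] => out
    | x :: rest' =>
      if x = 200 then
        let run := ((x :: rest').takeWhile (fun y => y == 200)).length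
        let run' := if run ≥ 24 then 16 - out.length % 16 + (out.length + run - 1) % 16 else run
        loopB fuel ((x :: rest').drop run) (out ++ List.replicate run' 200)
      else loopB fuel rest' (out ++ [x])

def delete_extra_spaces_alt (seq : List Int) : List Int := loopB seq.length seq []

-- ===== PRECONDITION & SPEC =====
def Spec_delete_extra_spaces (seq : List Int) (out : List Int) : Prop := out = delete_extra_spaces_alt seq
instance (seq : List Int) (out : List Int) : Decidable (Spec_delete_extra_spaces seq out) := by unfold Spec_delete_extra_spaces; infer_instance

-- ===== CLAIM (what is proved, stated in full; the proofs are below) =====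
def Claim_equal_delete_extra_spaces : Prop := ∀ (seq : List Int), Dom_delete_extra_spaces seq → Spec_delete_extra_spaces seq (delete_extra_spaces seq)

-- ===== LEMMAS AND PROOFS =====

theorem dropWhile_eq_drop (p : Int → Bool) (l : List Int) :
    l.dropWhile p = l.drop (l.takeWhile p).length := by
  induction l with
  | nil => simp
  | cons x t ih =>
    rw [List.takeWhile_cons, List.dropWhile_cons]
    by_cases hp : p x
    · simp [hp, ih]
    · simp [hp]

theorem length_takeWhile_le' (p : Int → Bool) (l : List Int) :
    (l.takeWhile p).length ≤ l.length := by
  induction l with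
  | nil => simp
  | cons x t ih =>
    rw [List.takeWhile_cons]
    by_cases hp : p x
    · simp [hp]; omega
    · simp [hp]

theorem takeWhile200_replicate (l : List Int) :
    l.takeWhile (fun y => y == 200) =
      List.replicate (l.takeWhile (fun y => y == 200)).length 200 := by
  induction l with
  | nil => simp
  | cons x t ih =>
    by_cases hx : x = 200
    · rw [List.takeWhile_cons, if_pos (by simpa using hx)]
      simp [List.replicate_succ, hx, ← ih]
    · rw [List.takeWhile_cons, if_neg (by simpa using hx)]
      simp

theorem dropWhile_head_not {p : Int → Bool} {l t : List Int} {y : Int}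
    (h : l.dropWhile p = y :: t) : p y = false := by
  induction l with
  | nil => simp at h
  | cons x xs ih =>
    rw [List.dropWhile_cons] at h
    split at h
    · exact ih h
    · rename_i hp
      cases h
      simpa using hp

-- with enough fuel, innerA finds the first index ≥ t holding no 200
theorem innerA_eq (seq : List Int) (fuel t : Nat)
    (hf : seq.length ≤ t + fuel) (ht : t ≤ seq.length) :
    innerA seq fuel t = t + ((seq.drop t).takeWhile (fun y => y == 200)).length := by
  induction fuel generalizing t with
  | zero =>
    have : t = seq.length := by omega
    subst this
    simp [innerA]
  | succ fuel ih =>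
    rw [innerA]
    split
    · rename_i h
      rw [List.drop_eq_getElem_cons h]
      split
      · rename_i hx
        rw [List.takeWhile_cons, if_pos (by simpa using hx)]
        rw [ih (t + 1) (by omega) (by omega)]
        simp; omega
      · rename_i hx
        rw [List.takeWhile_cons, if_neg (by simpa using hx)]
        simp
    · rename_i h
      have : t = seq.length := by omega
      simp [this]

theorem loopA_eq_loopB :
    ∀ (n : Nat) (rest : List Int), rest.length ≤ n →
      ∀ (fa fb : Nat) (out : List Int), rest.length < fa → rest.length ≤ fb →
        loopA fa (out ++ rest) out.length = loopB fb rest out := by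
  intro n
  induction n with
  | zero =>
    intro rest hlen fa fb out hfa hfb
    have : rest = [] := by
      cases rest with
      | nil => rfl
      | cons a b => simp at hlen
    subst this
    obtain ⟨fa', rfl⟩ : ∃ fa', fa = fa' + 1 := ⟨fa - 1, by omega⟩
    rw [loopA]
    cases fb with
    | zero => simp [loopB]
    | succ fb => simp [loopB]
  | succ n ih =>
    intro rest hlen fa fb out hfa hfb
    obtain ⟨fa', rfl⟩ : ∃ fa', fa = fa' + 1 := ⟨fa - 1, by omega⟩
    cases rest with
    | nil =>
      rw [loopA]
      cases fb with
      | zero => simp [loopB]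
      | succ fb => simp [loopB]
    | cons x rest' =>
      obtain ⟨fb', rfl⟩ : ∃ fb', fb = fb' + 1 := ⟨fb - 1, by simp at hfb; omega⟩
      have hidx : out.length < (out ++ x :: rest').length := by simp
      have hget : (out ++ x :: rest')[out.length]'hidx = x := by
        rw [List.getElem_append_right (le_refl out.length)]
        simp
      by_cases hx : x = 200
      · -- a run of 200s starts here
        set R : Nat := ((x :: rest').takeWhile (fun y => y == 200)).length with hR
        have hR1 : 1 ≤ R := by
          rw [hR, List.takeWhile_cons, if_pos (by simpa using hx)]
          simp
        have hRle : R ≤ rest'.length + 1 := by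
          have := length_takeWhile_le' (fun y => y == 200) (x :: rest')
          simpa using this
        have hdweq : (x :: rest').dropWhile (fun y => y == 200) = (x :: rest').drop R := by
          rw [dropWhile_eq_drop, ← hR]
        have hsplit : x :: rest' = List.replicate R 200 ++ (x :: rest').drop R := by
          conv_lhs => rw [← List.takeWhile_append_dropWhile
            (p := fun y => y == 200) (l := x :: rest')]
          rw [hdweq]
          congr 1
          rw [takeWhile200_replicate, ← hR]
        -- the inner while stops right after the run
        have hinner : innerA (out ++ x :: rest') (out ++ x :: rest').length
            (out.length + 1) = out.length + R := by
          rw [innerA_eq _ _ _ (by omega) (by simp)]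
          have hdrop1 : (out ++ x :: rest').drop (out.length + 1) = rest' := by
            rw [show out ++ x :: rest' = (out ++ [x]) ++ rest' by simp,
                show out.length + 1 = (out ++ [x]).length by simp, List.drop_left]
          rw [hdrop1]
          have : R = 1 + (rest'.takeWhile (fun y => y == 200)).length := by
            rw [hR, List.takeWhile_cons, if_pos (by simpa using hx)]
            simp; omega
          omega
        rw [loopA]
        rw [dif_pos hidx]
        rw [if_pos (by rw [hget]; exact hx)]
        simp only [hinner]
        by_cases hbig : R ≥ 24
        · rw [if_pos (by omega : out.length + R - 1 - out.length + 1 ≥ 24)]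
          set i : Nat := out.length with hi
          set k : Nat := 16 - i % 16 + (i + R - 1) % 16 with hk
          have hkR : k ≤ R - 1 := by omega
          have hlimit : i - i % 16 + 16 + (i + R - 1) % 16 = i + k := by omega
          rw [hlimit]
          have htake : (out ++ x :: rest').take (i + k) =
              out ++ List.replicate k 200 := by
            rw [List.take_append]
            congr 1
            · rw [List.take_of_length_le (by omega)]
            · rw [show i + k - out.length = k by omega, hsplit, List.take_append,
                  List.take_replicate, List.length_replicate,
                  min_eq_left (by omega), show k - R = 0 by omega]
              simp
          have hdropj : (out ++ x :: rest').drop (i + R - 1 + 1) = (x :: rest').drop R := by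
            rw [show i + R - 1 + 1 = out.length + R by omega, List.drop_append,
                List.drop_of_length_le (by omega), show out.length + R - out.length = R by omega]
            simp
          rw [htake, hdropj]
          -- B side takes the same step at once
          rw [loopB]
          rw [if_pos hx]
          simp only [← hR, ← hi, ← hk]
          rw [if_pos hbig]
          cases hdw : (x :: rest').drop R with
          | nil =>
            rw [List.append_nil]
            have hA : loopA fa' (out ++ List.replicate k 200) (i + k + 1) =
                out ++ List.replicate k 200 := by
              cases fa' with
              | zero => rw [loopA]
              | succ f => rw [loopA, dif_neg (by simp; omega)]
            rw [hA]
            cases fb' with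
            | zero => simp [loopB]
            | succ fb'' => simp [loopB]
          | cons y rest'' =>
            have hy : y ≠ 200 := by
              have := dropWhile_head_not (p := fun y => y == 200)
                (l := x :: rest') (t := rest'') (y := y) (by rw [hdweq, hdw])
              simpa using this
            have hcg : rest'.length + 1 - R = rest''.length + 1 := by
              have := congrArg List.length hdw
              simpa using this
            obtain ⟨fb'', rfl⟩ : ∃ fb'', fb' = fb'' + 1 := by
              refine ⟨fb' - 1, ?_⟩
              simp at hfb
              omega
            rw [show out ++ List.replicate k 200 ++ y :: rest'' =
                  (out ++ List.replicate k 200 ++ [y]) ++ rest'' by simp,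
                show i + k + 1 = (out ++ List.replicate k 200 ++ [y]).length by
                  simp [hi]; omega,
                ih rest'' (by simp at hlen; omega) fa' fb'' _
                  (by simp at hfa; omega) (by simp at hfb; omega)]
            rw [loopB]
            rw [if_neg hy]
        · rw [if_neg (by omega : ¬ (out.length + R - 1 - out.length + 1 ≥ 24))]
          rw [show out.length + R - 1 + 1 = (out ++ List.replicate R 200).length by
                simp; omega,
              show out ++ x :: rest' =
                  (out ++ List.replicate R 200) ++ (x :: rest').drop R by
                rw [List.append_assoc, ← hsplit],
              ih _ (by simp at hlen ⊢; omega) fa' fb' _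
                (by simp at hfa ⊢; omega) (by simp at hfb ⊢; omega)]
          rw [loopB]
          rw [if_pos hx]
          simp only [← hR]
          rw [if_neg hbig]
      · -- plain token
        rw [loopA]
        rw [dif_pos hidx]
        rw [if_neg (by rw [hget]; exact hx)]
        rw [show out.length + 1 = (out ++ [x]).length by simp,
            show out ++ x :: rest' = (out ++ [x]) ++ rest' by simp,
            ih rest' (by simp at hlen; omega) fa' fb' (out ++ [x])
              (by simp at hfa; omega) (by simp at hfb; omega)]
        rw [loopB]
        rw [if_neg hx]

-- ===== VERDICT (by name: the statement is the Claim_ definition above) =====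
theorem delete_extra_spaces_spec : Claim_equal_delete_extra_spaces := by
  intro seq _
  unfold Spec_delete_extra_spaces delete_extra_spaces delete_extra_spaces_alt
  have := loopA_eq_loopB seq.length seq (le_refl _) (seq.length + 1) seq.length []
    (by omega) (le_refl _)
  simpa using this
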